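-- pv_equiv track=rewrite | github.com/dzbarts/excel-loader | dags/manual_excel_loader/loader.py | _insert_fixed_values
-- ===== SOURCE A (Python) =====
-- def _insert_fixed_values(
--     row: tuple,
--     headers: list[str],
--     fixed_values: dict[str, str],
-- ) -> tuple:
--     """Вставить фиксированные значения шаблона на правильные позиции в строке."""
--     if not fixed_values:
--         return row
--     data_iter = iter(row)
--     result = []
--     for col in headers:
--         if col in fixed_values:
--             result.append(fixed_values[col])
--         else:
--             try:
--                 result.append(next(data_iter))
--             except StopIteration:
--                 result.append(None)
--     return tuple(result)
-- ===== SOURCE B (Python) =====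
-- def _insert_fixed_values(
--     row: tuple,
--     headers: list[str],
--     fixed_values: dict[str, str],
-- ) -> tuple:
--     """Insert template fixed values at header positions (slice-then-insert variant)."""
--     if not fixed_values:
--         return row
--     k = sum(1 for col in headers if col in fixed_values)
--     n_data = len(headers) - k
--     result = [row[j] if j < len(row) else None for j in range(n_data)]
--     for i, col in enumerate(headers):
--         if col in fixed_values:
--             result.insert(i, fixed_values[col])
--     return tuple(result)
-- ===== Notes on version B (the rewrite author's own statement) =====
-- stated objective: alternative
-- what changed: A merges headers against an iterator over the row in one pass; B first slices/pads the row to exactly the non-fixed slot count and then splices each fixed value in with list.insert at its header index, the left-to-right insertions self-correcting the offsets.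
import Mathlib
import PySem

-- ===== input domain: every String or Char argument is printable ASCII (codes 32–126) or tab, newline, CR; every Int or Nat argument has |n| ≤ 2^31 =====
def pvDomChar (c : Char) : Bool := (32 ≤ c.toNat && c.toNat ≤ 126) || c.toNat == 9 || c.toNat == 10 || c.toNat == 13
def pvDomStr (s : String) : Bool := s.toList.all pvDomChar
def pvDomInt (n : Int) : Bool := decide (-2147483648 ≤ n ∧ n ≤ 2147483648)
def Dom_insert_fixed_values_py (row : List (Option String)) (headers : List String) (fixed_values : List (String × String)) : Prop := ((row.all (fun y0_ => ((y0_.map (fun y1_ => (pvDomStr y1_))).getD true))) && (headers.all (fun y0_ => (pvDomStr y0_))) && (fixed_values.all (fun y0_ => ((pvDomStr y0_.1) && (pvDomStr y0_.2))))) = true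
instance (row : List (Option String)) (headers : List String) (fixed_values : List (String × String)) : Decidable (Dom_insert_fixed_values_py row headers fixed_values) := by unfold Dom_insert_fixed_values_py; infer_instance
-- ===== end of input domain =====

-- B replaces A's iterator-consuming merge loop with a pre-sliced data list plus
-- left-to-right list.insert of the fixed values (alternative decomposition, same cost).

-- ===== PORT A =====
-- the for-loop over headers, consuming `data_iter` (a StopIteration-swallowed `next` = none forever once the row is exhausted)
def pvGoA (fv : List (String × String)) : List String → List (Option String) → List (Option String)
  | [], _ => []
  | h :: hs, r =>
    match fv.lookup h with
    | some v => some v :: pvGoA fv hs r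
    | none =>
      match r with
      | [] => none :: pvGoA fv hs []
      | x :: xs => x :: pvGoA fv hs xs

def insert_fixed_values_py (row : List (Option String)) (headers : List String) (fixed_values : List (String × String)) : List (Option String) :=
  if fixed_values = [] then row
  else pvGoA fixed_values headers row

-- ===== PORT B =====
def insert_fixed_values_py_alt (row : List (Option String)) (headers : List String) (fixed_values : List (String × String)) : List (Option String) :=
  if fixed_values = [] then row
  else
    let k : Nat := headers.countP (fun c => (fixed_values.lookup c).isSome)
    -- k ≤ len(headers), so Nat subtraction agrees with Python's int subtraction here
    let nData : Nat := headers.length - k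
    let data : List (Option String) := (List.range nData).map (fun j => row.getD j none)
    (PySem.List.enumerate headers).foldl
      (fun acc p =>
        match fixed_values.lookup p.2 with
        | some v => PySem.List.insert acc p.1 (some v)
        | none => acc) data

-- ===== PRECONDITION & SPEC =====
def Spec_insert_fixed_values_py (row : List (Option String)) (headers : List String) (fixed_values : List (String × String)) (out : List (Option String)) : Prop := out = insert_fixed_values_py_alt row headers fixed_values
instance (row : List (Option String)) (headers : List String) (fixed_values : List (String × String)) (out : List (Option String)) : Decidable (Spec_insert_fixed_values_py row headers fixed_values out) := by unfold Spec_insert_fixed_values_py; infer_instance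

-- ===== CLAIM (what is proved, stated in full; the proofs are below) =====
def Claim_equal_insert_fixed_values_py : Prop := ∀ (row : List (Option String)) (headers : List String) (fixed_values : List (String × String)), Dom_insert_fixed_values_py row headers fixed_values → Spec_insert_fixed_values_py row headers fixed_values (insert_fixed_values_py row headers fixed_values)

-- ===== LEMMAS AND PROOFS =====

-- the insertion loop, started after a committed prefix `pre`, rebuilds A's merge of the remaining headers
theorem pv_loop_eq (fv : List (String × String)) :
    ∀ (hs : List String) (pre data : List (Option String)),
      data.length = hs.countP (fun c => !(fv.lookup c).isSome) →
      (PySem.List.enumerate hs (pre.length : Int)).foldl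
        (fun acc p =>
          match fv.lookup p.2 with
          | some v => PySem.List.insert acc p.1 (some v)
          | none => acc) (pre ++ data)
      = pre ++ pvGoA fv hs data := by
  intro hs
  induction hs with
  | nil =>
    intro pre data hlen
    have : data = [] := List.eq_nil_of_length_eq_zero (by simpa using hlen)
    simp [this, PySem.List.enumerate, pvGoA]
  | cons h hs ih =>
    intro pre data hlen
    rw [PySem.List.enumerate_cons, List.foldl_cons]
    cases hfv : fv.lookup h with
    | some v =>
      have hins : PySem.List.insert (pre ++ data) ((pre.length : Nat) : Int) (some v)
          = pre ++ some v :: data := by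
        rw [PySem.List.insert_natCast _ _ _ (by simp)]
        simp
      have hlen' : data.length = hs.countP (fun c => !(fv.lookup c).isSome) := by
        simpa [List.countP_cons, hfv] using hlen
      have := ih (pre ++ [some v]) data hlen'
      simp only [List.length_append, List.length_cons, List.length_nil] at this
      simp only [hins]
      rw [show (pre ++ some v :: data) = (pre ++ [some v]) ++ data by simp,
          show ((pre.length : Int) + 1) = ((pre.length + 1 : Nat) : Int) by push_cast; ring]
      rw [this]
      simp [pvGoA, hfv]
    | none =>
      have hpos : 0 < data.length := by
        rw [hlen]; simp [hfv]
      cases data with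
      | nil => simp at hpos
      | cons x xs =>
        have hlen' : xs.length = hs.countP (fun c => !(fv.lookup c).isSome) := by
          simpa [List.countP_cons, hfv] using hlen
        have := ih (pre ++ [x]) xs hlen'
        simp only [List.length_append, List.length_cons, List.length_nil] at this
        rw [show (pre ++ x :: xs) = (pre ++ [x]) ++ xs by simp,
            show ((pre.length : Int) + 1) = ((pre.length + 1 : Nat) : Int) by push_cast; ring]
        rw [this]
        simp [pvGoA, hfv]

-- padding/truncating the row to exactly the number of non-fixed headers does not change A's merge
theorem pv_pad_cons (row : List (Option String)) (m : Nat) :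
    (List.range (m+1)).map (fun j => row.getD j none)
      = row.getD 0 none :: (List.range m).map (fun j => row.tail.getD j none) := by
  rw [List.range_succ_eq_map, List.map_cons, List.map_map]
  refine congrArg (_ :: ·) ?_
  apply List.map_congr_left
  intro j _
  cases row <;> simp [List.getD]

theorem pv_pad_eq (fv : List (String × String)) :
    ∀ (hs : List String) (row : List (Option String)),
      pvGoA fv hs ((List.range (hs.countP (fun c => !(fv.lookup c).isSome))).map
        (fun j => row.getD j none))
      = pvGoA fv hs row := by
  intro hs
  induction hs with
  | nil => intro row; simp [pvGoA]
  | cons h hs ih =>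
    intro row
    cases hfv : fv.lookup h with
    | some v =>
      have hcnt : (h :: hs).countP (fun c => !(fv.lookup c).isSome)
          = hs.countP (fun c => !(fv.lookup c).isSome) := by
        simp [hfv]
      rw [hcnt]
      simp only [pvGoA, hfv]
      exact congrArg (some v :: ·) (ih row)
    | none =>
      have hcnt : (h :: hs).countP (fun c => !(fv.lookup c).isSome)
          = hs.countP (fun c => !(fv.lookup c).isSome) + 1 := by
        simp [hfv]
      rw [hcnt, pv_pad_cons]
      cases row with
      | nil =>
        simp only [pvGoA, hfv, List.tail_nil, List.getD, List.getElem?_nil, Option.getD_none]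
        exact congrArg (none :: ·) (ih [])
      | cons x xs =>
        simp only [pvGoA, hfv, List.tail_cons, List.getD, List.getElem?_cons_zero,
          Option.getD_some]
        exact congrArg (x :: ·) (ih xs)

theorem pv_count_sub (fv : List (String × String)) (hs : List String) :
    hs.length - hs.countP (fun c => (fv.lookup c).isSome)
      = hs.countP (fun c => !(fv.lookup c).isSome) := by
  induction hs with
  | nil => simp
  | cons h hs ih =>
    have h1 : hs.countP (fun c => (fv.lookup c).isSome) ≤ hs.length := List.countP_le_length
    rw [show (fun c => !(List.lookup c fv).isSome) = (fun c => (List.lookup c fv).isNone)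
      from funext (fun c => by simp)] at ih
    rw [List.length_cons, List.countP_cons, List.countP_cons]
    cases hfv : (fv.lookup h).isSome <;>
      · simp only [hfv, Bool.not_true, Bool.not_false]
        norm_num
        omega

-- ===== VERDICT (by name: the statement is the Claim_ definition above) =====
theorem insert_fixed_values_py_spec : Claim_equal_insert_fixed_values_py := by
  intro row headers fv _
  unfold Spec_insert_fixed_values_py insert_fixed_values_py insert_fixed_values_py_alt
  by_cases hf : fv = []
  · simp [hf]
  · simp only [if_neg hf]
    have hlen : ((List.range (headers.length - headers.countP (fun c => (fv.lookup c).isSome))).map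
        (fun j => row.getD j none)).length
        = headers.countP (fun c => !(fv.lookup c).isSome) := by
      simp [pv_count_sub]
    have := pv_loop_eq fv headers []
      ((List.range (headers.length - headers.countP (fun c => (fv.lookup c).isSome))).map
        (fun j => row.getD j none)) hlen
    simp only [List.length_nil, Nat.cast_zero, List.nil_append] at this
    rw [this, pv_count_sub, pv_pad_eq]
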